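-- pv_equiv track=rewrite | github.com/mapeca/normalize-watcher | src/files.py | orderByDeepestDir
-- ===== SOURCE A (Python) =====
-- def orderByDeepestDir(dirs):
--     ordered = {}
--     while dirs:
--         deep = 0
--         dir = dirs[0]
--         for char in dir:
--             if char == "/":
--                 deep += 1
--         ordered[dir] = deep
--         dirs.pop(0)
--     ordered = dict(reversed(sorted(ordered.items(), key=lambda item: item[1])))
--     return ordered
-- ===== SOURCE B (Python) =====
-- # Bucket sort on slash-depth instead of a comparison sort; also empties dirs in place like A.
-- def orderByDeepestDir(dirs):
--     buckets = {}
--     seen = set()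
--     for d in dirs:
--         if d not in seen:
--             seen.add(d)
--             buckets.setdefault(d.count("/"), []).append(d)
--     dirs.clear()
--     out = {}
--     for depth in sorted(buckets, reverse=True):
--         for d in reversed(buckets[depth]):
--             out[d] = depth
--     return out
-- ===== Notes on version B (the rewrite author's own statement) =====
-- stated objective: faster
-- what changed: Replaces A's pop(0)-driven dict build plus comparison sort of the items (sorted by depth, then reversed) with a single seen-set/bucket pass and a counting-sort-style emission: distinct depths sorted descending, each bucket emitted reversed.
import Mathlib
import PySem

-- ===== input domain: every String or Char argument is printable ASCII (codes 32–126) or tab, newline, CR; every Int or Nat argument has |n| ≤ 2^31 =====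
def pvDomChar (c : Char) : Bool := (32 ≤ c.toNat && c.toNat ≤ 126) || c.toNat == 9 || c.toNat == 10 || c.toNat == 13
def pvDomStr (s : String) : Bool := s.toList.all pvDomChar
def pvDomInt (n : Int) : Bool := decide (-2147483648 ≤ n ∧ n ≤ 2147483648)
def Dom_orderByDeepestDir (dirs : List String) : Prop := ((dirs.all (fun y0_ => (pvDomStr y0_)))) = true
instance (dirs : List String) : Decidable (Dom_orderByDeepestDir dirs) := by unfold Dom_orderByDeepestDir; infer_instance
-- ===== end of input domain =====

-- B replaces A's comparison sort of the dir->depth pairs by a counting/bucket sort on slash-depth.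
-- Both Pythons empty the argument list in place (A pops, B clears); the theorem is about the return value.

-- ===== PORT A =====
-- the inner 'for char in dir' loop of A
def pvDeepOf (s : String) : Int :=
  s.toList.foldl (fun deep c => if c == '/' then deep + 1 else deep) 0

def orderByDeepestDir (dirs : List String) : List (String × Int) :=
  -- 'while dirs: … ordered[dir] = deep; dirs.pop(0)' consumes dirs front to back
  let ordered := dirs.foldl (fun d s => d.insert s (pvDeepOf s)) (PySem.Dict.empty)
  -- dict(reversed(sorted(ordered.items(), key=lambda item: item[1])))
  (PySem.Dict.ofList ((PySem.List.sorted ordered.items (fun it => it.2)).reverse)).items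

-- ===== PORT B =====
def pvDepth (s : String) : Int := (PySem.Str.count s "/" : Int)

def orderByDeepestDir_alt (dirs : List String) : List (String × Int) :=
  -- first pass: seen-set dedup + bucket by depth
  -- ('buckets.setdefault(k, []).append(d)' is 'buckets[k] = buckets.get(k, []) + [d]', i.e. Dict.modify)
  let st := dirs.foldl
    (fun st s =>
      if PySem.Set.contains st.2 s then st
      else (st.1.modify (pvDepth s) [] (fun l => l ++ [s]), PySem.Set.add st.2 s))
    ((PySem.Dict.empty : PySem.Dict Int (List String)), (PySem.Set.empty : PySem.Set String))
  let buckets := st.1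
  -- second pass: depths descending, each bucket reversed
  let out := (PySem.List.sorted buckets.keys (fun k => k) true).foldl
    (fun out depth => ((buckets.getD depth []).reverse).foldl (fun o s => o.insert s depth) out)
    PySem.Dict.empty
  out.items

-- ===== PRECONDITION & SPEC =====
def Spec_orderByDeepestDir (dirs : List String) (out : List (String × Int)) : Prop := out = orderByDeepestDir_alt dirs
instance (dirs : List String) (out : List (String × Int)) : Decidable (Spec_orderByDeepestDir dirs out) := by unfold Spec_orderByDeepestDir; infer_instance

-- ===== CLAIM (what is proved, stated in full; the proofs are below) =====
def Claim_equal_orderByDeepestDir : Prop := ∀ (dirs : List String), Dom_orderByDeepestDir dirs → Spec_orderByDeepestDir dirs (orderByDeepestDir dirs)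

-- ===== LEMMAS AND PROOFS =====

-- A's character loop counts the slashes, i.e. computes B's d.count("/")
theorem pvGo_single (c : Char) : ∀ (fuel : Nat) (l : List Char) (acc : Nat), l.length ≤ fuel →
    PySem.Chars.count.go [c] fuel l acc = acc + l.count c := by
  intro fuel
  induction fuel with
  | zero => intro l acc h; cases l with
    | nil => simp [PySem.Chars.count.go]
    | cons hd t => simp at h
  | succ n ih => intro l acc h; cases l with
    | nil => simp [PySem.Chars.count.go]
    | cons hd t =>
      simp only [PySem.Chars.count.go, List.isPrefixOf, List.length]
      by_cases hc : c == hd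
      · simp [ih t (acc + 1) (by simpa using h), (LawfulBEq.eq_of_beq hc).symm]
        omega
      · simp only [hc, Bool.false_and]
        rw [ih t acc (by simp at h; omega)]
        simp [List.count_cons]
        have : ¬ hd = c := fun he => absurd (by simp [he]) hc
        simp [this]

theorem pvDeepOf_eq : pvDeepOf = pvDepth := by
  funext s
  show s.toList.foldl (fun deep c => if c == '/' then deep + 1 else deep) (0:Int) = _
  rw [PySem.List.foldl_beq_add_one]
  have : PySem.Str.count s "/" = s.toList.count '/' := by
    show PySem.Chars.count s.toList "/".toList = _
    have ht : "/".toList = ['/'] := rfl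
    rw [ht, PySem.Chars.count, if_neg (by simp), pvGo_single _ _ _ _ le_rfl]
    simp
  rw [pvDepth, this]; simp

-- A's dict-building loop: items are the deduped dirs paired with their depths
theorem pvItemsA (dirs : List String) (S : List String) (d : PySem.Dict String Int)
    (hd : d.items = S.map (fun s => (s, pvDepth s))) :
    (dirs.foldl (fun d s => d.insert s (pvDepth s)) d).items
      = (PySem.Set.update S dirs).map (fun s => (s, pvDepth s)) := by
  induction dirs generalizing S d with
  | nil => simpa [PySem.Set.update] using hd
  | cons s r ih =>
    have hkeys : d.keys = S := by
      show d.items.map (·.1) = S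
      rw [hd, List.map_map]
      exact List.map_id'' (by intro x; rfl) _
    have hcon : d.contains s = decide (s ∈ S) := by
      rw [PySem.Dict.contains_eq_decide_mem_keys, hkeys]
    simp only [List.foldl_cons]
    have hupd : PySem.Set.update S (s :: r) = PySem.Set.update (PySem.Set.add S s) r := by
      simp [PySem.Set.update]
    rw [hupd]
    apply ih
    by_cases hs : s ∈ S
    · have hc : d.contains s = true := by simp [hcon, hs]
      rw [PySem.Dict.items_insert_of_contains d _ hc, hd]
      have hadd : PySem.Set.add S s = S := by simp [PySem.Set.add, hs]
      rw [hadd, List.map_map]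
      apply List.map_congr_left
      intro x _
      by_cases hx : x = s
      · simp [hx]
      · simp [Function.comp, hx]
    · have hc : d.contains s = false := by simp [hcon, hs]
      rw [PySem.Dict.items_insert_of_not_contains d _ hc, hd]
      have hadd : PySem.Set.add S s = S ++ [s] := by simp [PySem.Set.add, hs]
      rw [hadd]
      simp

-- the not-yet-seen elements B's first pass keeps, in first-occurrence order
def pvNew (S : PySem.Set String) : List String → List String
  | [] => []
  | s :: r => if PySem.Set.contains S s then pvNew S r else s :: pvNew (PySem.Set.add S s) r

theorem pvUpdate_eq_append_new (dirs : List String) (S : PySem.Set String) :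
    PySem.Set.update S dirs = S ++ pvNew S dirs := by
  induction dirs generalizing S with
  | nil => simp [PySem.Set.update, pvNew]
  | cons s r ih =>
    simp only [PySem.Set.update, List.foldl_cons, pvNew]
    by_cases hs : PySem.Set.contains S s
    · have hs' : s ∈ S := by simpa using hs
      have : PySem.Set.add S s = S := by simp [PySem.Set.add, hs']
      rw [this, hs]
      simpa [PySem.Set.update] using ih S
    · have hs' : s ∉ S := by simpa using hs
      have hadd : PySem.Set.add S s = S ++ [s] := by simp [PySem.Set.add, hs']
      simp only [hs]
      rw [show List.foldl PySem.Set.add (PySem.Set.add S s) r = PySem.Set.update (PySem.Set.add S s) r from rfl,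
        ih, hadd]
      simp

-- B's first pass is the bucket fold over exactly those elements
theorem pvBLoop_eq (dirs : List String) (S : PySem.Set String) (b : PySem.Dict Int (List String)) :
    dirs.foldl
      (fun st s =>
        if PySem.Set.contains st.2 s then st
        else (st.1.modify (pvDepth s) [] (fun l => l ++ [s]), PySem.Set.add st.2 s))
      (b, S)
    = ((pvNew S dirs).foldl (fun b s => b.modify (pvDepth s) [] (fun l => l ++ [s])) b,
       PySem.Set.update S dirs) := by
  induction dirs generalizing S b with
  | nil => simp [pvNew, PySem.Set.update]
  | cons s r ih =>
    simp only [List.foldl_cons, pvNew]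
    by_cases hs : PySem.Set.contains S s
    · have hs' : s ∈ S := by simpa using hs
      have hadd : PySem.Set.add S s = S := by simp [PySem.Set.add, hs']
      simp only [hs, if_true, ih, PySem.Set.update, List.foldl_cons, hadd]
    · simp only [hs, if_false, Bool.false_eq_true, ih, List.foldl_cons, PySem.Set.update]

-- insertBy passes over a prefix none of whose elements x goes before
theorem pvInsertBy_append {α : Type} (before : α → α → Bool) (x : α) (A B : List α)
    (h : ∀ y ∈ A, before x y = false) :
    PySem.List.insertBy before x (A ++ B) = A ++ PySem.List.insertBy before x B := by
  induction A with
  | nil => simp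
  | cons a t ih =>
    simp only [List.cons_append, PySem.List.insertBy]
    rw [h a (by simp)]
    simp only [Bool.false_eq_true, if_false]
    rw [ih (fun y hy => h y (by simp [hy]))]

-- insertBy stops in front of a list it goes before entirely
theorem pvInsertBy_front {α : Type} (before : α → α → Bool) (x : α) (B : List α)
    (h : ∀ y ∈ B, before x y = true) :
    PySem.List.insertBy before x B = x :: B := by
  cases B with
  | nil => rfl
  | cons b t => simp [PySem.List.insertBy, h b (by simp)]

-- stable sort by an Int key = concatenation of the key-buckets in ascending key order
theorem pvSorted_eq_flatMap_buckets (P : List (String × Int)) (ks : List Int)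
    (hks : ks.Pairwise (· < ·)) (hmem : ∀ p ∈ P, p.2 ∈ ks) :
    PySem.List.sorted P (fun it => it.2)
      = ks.flatMap (fun k => P.filter (fun p => p.2 == k)) := by
  induction P using List.reverseRecOn with
  | nil => simp [PySem.List.sorted]
  | append_singleton P x ih =>
    have hsx : PySem.List.sorted (P ++ [x]) (fun it => it.2)
        = PySem.List.insertBy (fun a b => decide (a.2 < b.2)) x (PySem.List.sorted P (fun it => it.2)) := by
      rw [PySem.List.sorted_eq_foldl_insertBy, PySem.List.sorted_eq_foldl_insertBy, List.foldl_append]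
      rfl
    rw [hsx, ih (fun p hp => hmem p (by simp [hp]))]
    clear hsx ih
    have hc : x.2 ∈ ks := hmem x (by simp)
    obtain ⟨ks1, ks2, rfl⟩ := List.append_of_mem hc
    rw [List.pairwise_append] at hks
    obtain ⟨h1, h2, h12⟩ := hks
    rw [List.pairwise_cons] at h2
    obtain ⟨h2c, h2'⟩ := h2
    rw [List.flatMap_append, List.flatMap_cons]
    rw [show (List.flatMap (fun k => P.filter (fun p => p.2 == k)) ks1) ++
          (P.filter (fun p => p.2 == x.2) ++ List.flatMap (fun k => P.filter (fun p => p.2 == k)) ks2)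
        = ((List.flatMap (fun k => P.filter (fun p => p.2 == k)) ks1) ++ P.filter (fun p => p.2 == x.2)) ++
          List.flatMap (fun k => P.filter (fun p => p.2 == k)) ks2 by simp]
    rw [pvInsertBy_append _ x _ _ (by
      intro y hy
      simp only [List.mem_append, List.mem_flatMap] at hy
      rcases hy with ⟨k, hk, hyk⟩ | hyk
      · have hyx : y.2 = k := by simpa using List.of_mem_filter hyk
        have : k < x.2 := h12 k hk x.2 (by simp)
        simp [hyx]; omega
      · have : y.2 = x.2 := by simpa using List.of_mem_filter hyk
        simp [this])]
    rw [pvInsertBy_front _ x _ (by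
      intro y hy
      simp only [List.mem_flatMap] at hy
      obtain ⟨k, hk, hyk⟩ := hy
      have hyx : y.2 = k := by simpa using List.of_mem_filter hyk
      have : x.2 < k := h2c k hk
      simp [hyx]; omega)]
    rw [List.flatMap_append, List.flatMap_cons]
    have hk1 : List.flatMap (fun k => (P ++ [x]).filter (fun p => p.2 == k)) ks1
        = List.flatMap (fun k => P.filter (fun p => p.2 == k)) ks1 := by
      apply List.flatMap_congr
      intro k hk
      rw [List.filter_append]
      have : x.2 ≠ k := by have := h12 k hk x.2 (by simp); omega
      simp [this]
    have hk2 : List.flatMap (fun k => (P ++ [x]).filter (fun p => p.2 == k)) ks2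
        = List.flatMap (fun k => P.filter (fun p => p.2 == k)) ks2 := by
      apply List.flatMap_congr
      intro k hk
      rw [List.filter_append]
      have : x.2 ≠ k := by have := h2c k hk; omega
      simp [this]
    have hkc : (P ++ [x]).filter (fun p => p.2 == x.2) = P.filter (fun p => p.2 == x.2) ++ [x] := by
      rw [List.filter_append]; simp
    rw [hk1, hk2, hkc]
    simp

-- a dict built from pairs with distinct keys lists exactly those pairs
theorem pvItems_ofList {ν : Type} (ps : List (String × ν)) (h : (ps.map (·.1)).Nodup) :
    (PySem.Dict.ofList ps).items = ps := by
  have := PySem.Dict.items_foldl_insert_fresh ps (fun p => p.1) (fun p => p.2) PySem.Dict.empty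
    (by intro a _; exact PySem.Dict.contains_empty _) h
  simpa [PySem.Dict.ofList, PySem.Dict.update] using this

-- B's nested second-pass loop is one fold over the flattened (dir, depth) list
theorem pvNested (g : Int → List String) (depths : List Int) (acc : PySem.Dict String Int) :
    depths.foldl (fun out k => (g k).foldl (fun o s => o.insert s k) out) acc
      = (depths.flatMap (fun k => (g k).map (fun s => (s, k)))).foldl
          (fun o p => o.insert p.1 p.2) acc := by
  induction depths generalizing acc with
  | nil => simp
  | cons k r ih =>
    simp only [List.foldl_cons, List.flatMap_cons, List.foldl_append]
    rw [ih, List.foldl_map]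

-- ===== VERDICT (by name: the statement is the Claim_ definition above) =====
theorem orderByDeepestDir_spec : Claim_equal_orderByDeepestDir := by
  intro dirs _
  show orderByDeepestDir dirs = orderByDeepestDir_alt dirs
  unfold orderByDeepestDir orderByDeepestDir_alt
  simp only [pvDeepOf_eq]
  -- notation
  have hL : (PySem.Set.ofList dirs).Nodup := PySem.Set.nodup_ofList dirs
  -- A's dict items
  have hA1 : (dirs.foldl (fun d s => d.insert s (pvDepth s)) PySem.Dict.empty).items
      = (PySem.Set.ofList dirs).map (fun s => (s, pvDepth s)) := by
    rw [pvItemsA dirs [] _ (by rfl), PySem.Set.ofList_eq_foldl]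
    rfl
  rw [hA1]
  -- A's sorted items in bucket form
  have hks : (PySem.List.sorted (PySem.Set.ofList ((PySem.Set.ofList dirs).map pvDepth)) (fun k => k)).Pairwise (· < ·) :=
    PySem.List.sorted_ofList_pairwise_lt _
  have hmem : ∀ p ∈ (PySem.Set.ofList dirs).map (fun s => (s, pvDepth s)),
      p.2 ∈ PySem.List.sorted (PySem.Set.ofList ((PySem.Set.ofList dirs).map pvDepth)) (fun k => k) := by
    intro p hp
    obtain ⟨s, hs, rfl⟩ := List.mem_map.1 hp
    rw [PySem.List.mem_sorted, PySem.Set.mem_ofList]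
    exact List.mem_map_of_mem hs
  have hnodA : (((PySem.List.sorted ((PySem.Set.ofList dirs).map (fun s => (s, pvDepth s))) (fun it => it.2)).reverse).map (·.1)).Nodup := by
    have hperm : ((PySem.List.sorted ((PySem.Set.ofList dirs).map (fun s => (s, pvDepth s))) (fun it => it.2)).reverse).Perm
        ((PySem.Set.ofList dirs).map (fun s => (s, pvDepth s))) :=
      (List.reverse_perm _).trans (PySem.List.sorted_perm _ _ _)
    have hPn : (((PySem.Set.ofList dirs).map (fun s => (s, pvDepth s))).map (·.1)).Nodup := by
      rw [List.map_map]
      exact (List.map_id'' (by intro x; rfl) _) ▸ hL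
    exact ((hperm.map (·.1)).nodup_iff).2 hPn
  rw [pvItems_ofList _ hnodA, pvSorted_eq_flatMap_buckets _ _ hks hmem, List.reverse_flatMap]
  rw [pvBLoop_eq dirs PySem.Set.empty PySem.Dict.empty]
  have hNew : pvNew PySem.Set.empty dirs = PySem.Set.ofList dirs := by
    have h := pvUpdate_eq_append_new dirs PySem.Set.empty
    rw [PySem.Set.ofList_eq_foldl]
    simpa [PySem.Set.update, PySem.Set.empty] using h.symm
  dsimp only
  rw [hNew]
  -- buckets' keys are the distinct depths
  have hkeys : (List.foldl (fun b s => b.modify (pvDepth s) [] fun l => l ++ [s]) PySem.Dict.empty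
      (PySem.Set.ofList dirs)).keys = PySem.Set.ofList (List.map pvDepth (PySem.Set.ofList dirs)) := by
    rw [PySem.Dict.keys_foldl_modify_key (PySem.Set.ofList dirs) pvDepth [] (fun _ s => fun l => l ++ [s]) PySem.Dict.empty]
    rw [PySem.Set.ofList_eq_foldl]
    rfl
  -- each bucket holds its depth's dirs in first-occurrence order
  have hbucket : ∀ k, (List.foldl (fun b s => b.modify (pvDepth s) [] fun l => l ++ [s]) PySem.Dict.empty
      (PySem.Set.ofList dirs)).getD k []
      = (PySem.Set.ofList dirs).filter (fun s => pvDepth s == k) := by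
    intro k
    rw [show List.foldl (fun b s => b.modify (pvDepth s) [] fun l => l ++ [s]) PySem.Dict.empty
          (PySem.Set.ofList dirs)
        = List.foldl (fun d p => d.modify p.1 [] fun l => l ++ [p.2]) PySem.Dict.empty
          ((PySem.Set.ofList dirs).map (fun s => (pvDepth s, s))) from by rw [List.foldl_map]]
    rw [PySem.Dict.getD_foldl_modify_append]
    rw [List.filter_map, List.map_map]
    exact List.map_id'' (by intro x; rfl) _
  rw [hkeys]
  -- depths descending = ascending distinct depths reversed
  have hdesc : PySem.List.sorted (PySem.Set.ofList (List.map pvDepth (PySem.Set.ofList dirs))) (fun k => k) true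
      = (PySem.List.sorted (PySem.Set.ofList (List.map pvDepth (PySem.Set.ofList dirs))) (fun k => k)).reverse := by
    apply PySem.List.sorted_rev_eq_of_perm_of_pairwise_gt
    · exact (List.reverse_perm _).trans (PySem.List.sorted_perm _ _ _)
    · exact List.pairwise_reverse.2 hks
  rw [hdesc, pvNested]
  simp only [hbucket]
  -- the flattened (dir, depth) list has distinct dirs
  have hnodB : ((List.flatMap
        (fun k => List.map (fun s => (s, k))
          ((PySem.Set.ofList dirs).filter (fun s => pvDepth s == k)).reverse)
        (PySem.List.sorted (PySem.Set.ofList (List.map pvDepth (PySem.Set.ofList dirs))) fun k => k).reverse).map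
      (fun p => p.1)).Nodup := by
    rw [List.map_flatMap]
    simp only [List.map_map]
    have hid : ∀ (k : Int) (xs : List String), xs.map ((fun (p : String × Int) => p.1) ∘ (fun s => (s, k))) = xs :=
      fun k xs => List.map_id'' (by intro x; rfl) xs
    rw [List.flatMap_congr (fun k _ => hid k _)]
    rw [List.nodup_flatMap]
    constructor
    · intro k _
      exact List.nodup_reverse.2 (hL.filter _)
    · have hne : ((PySem.List.sorted (PySem.Set.ofList (List.map pvDepth (PySem.Set.ofList dirs))) fun k => k).reverse).Pairwise (· ≠ ·) :=
        (List.pairwise_reverse.2 hks).imp (by intro a b h; omega)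
      refine hne.imp ?_
      intro a b hab
      rw [Function.onFun, List.disjoint_left]
      intro s hsa hsb
      have ha : pvDepth s = a := by simpa using List.of_mem_filter (List.mem_reverse.1 hsa)
      have hb : pvDepth s = b := by simpa using List.of_mem_filter (List.mem_reverse.1 hsb)
      exact hab (ha ▸ hb)
  rw [show List.foldl (fun (o : PySem.Dict String Int) (p : String × Int) => o.insert p.1 p.2) PySem.Dict.empty
        (List.flatMap
          (fun k => List.map (fun s => (s, k)) ((PySem.Set.ofList dirs).filter (fun s => pvDepth s == k)).reverse)
          (PySem.List.sorted (PySem.Set.ofList (List.map pvDepth (PySem.Set.ofList dirs))) fun k => k).reverse)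
      = PySem.Dict.ofList (List.flatMap
          (fun k => List.map (fun s => (s, k)) ((PySem.Set.ofList dirs).filter (fun s => pvDepth s == k)).reverse)
          (PySem.List.sorted (PySem.Set.ofList (List.map pvDepth (PySem.Set.ofList dirs))) fun k => k).reverse) from rfl]
  rw [pvItems_ofList _ hnodB]
  -- bucket-by-bucket agreement
  apply List.flatMap_congr
  intro k _
  show (List.filter (fun p => p.2 == k) (List.map (fun s => (s, pvDepth s)) (PySem.Set.ofList dirs))).reverse
      = List.map (fun s => (s, k)) ((PySem.Set.ofList dirs).filter (fun s => pvDepth s == k)).reverse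
  rw [List.filter_map]
  rw [show ((fun (p : String × Int) => p.2 == k) ∘ (fun s => (s, pvDepth s))) = (fun s => pvDepth s == k) from rfl]
  rw [← List.map_reverse]
  apply List.map_congr_left
  intro s hs
  have : pvDepth s = k := by simpa using List.of_mem_filter (List.mem_reverse.1 hs)
  rw [this]
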